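-- pv_equiv track=rewrite | github.com/rtmendes/mngr | apps/minds/imbue/minds/desktop_client/latchkey/core.py | _cmdline_looks_like_latchkey_gateway
-- ===== SOURCE A (Python) =====
-- def _cmdline_looks_like_latchkey_gateway(cmdline: list[str]) -> bool:
--     """Check whether a process's ``cmdline`` looks like our ``latchkey gateway``.
--
--     We require ``latchkey`` to appear as a path component anywhere in the
--     argv (to tolerate shebang rewriting that injects ``env`` / ``python`` as
--     argv[0]) and the literal ``gateway`` subcommand anywhere after it. This
--     guards against PID reuse: an unrelated process that happens to grab the
--     same PID almost certainly won't match.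
--     """
--     if not cmdline:
--         return False
--     latchkey_idx: int | None = None
--     for idx, arg in enumerate(cmdline):
--         # Match ``latchkey`` anywhere in the arg. This handles direct
--         # execution (``/usr/local/bin/latchkey``), shebang rewrites that
--         # push the interpreter ahead of the script path
--         # (``/usr/bin/env node /opt/latchkey/cli``), and wrappers whose
--         # script path includes the word "latchkey" somewhere.
--         if "latchkey" in arg:
--             latchkey_idx = idx
--             break
--     if latchkey_idx is None:
--         return False
--     return "gateway" in cmdline[latchkey_idx + 1 :]
-- ===== SOURCE B (Python) =====
-- def _cmdline_looks_like_latchkey_gateway(cmdline: list[str]) -> bool: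
--     """Scan argv from the END, remembering whether a literal 'gateway' lies
--     ahead (later in argv); succeed at the first arg containing 'latchkey'
--     that has a gateway ahead of it.
--
--     Correct because A returns True iff some arg containing 'latchkey' is
--     strictly followed by a literal 'gateway': 'gateway' appears after the
--     FIRST latchkey arg exactly when it appears after SOME latchkey arg.
--     """
--     gateway_ahead = False
--     for arg in reversed(cmdline):
--         if "latchkey" in arg and gateway_ahead:
--             return True
--         if arg == "gateway":
--             gateway_ahead = True
--     return False
-- ===== Notes on version B (the rewrite author's own statement) =====
-- stated objective: alternative
-- what changed: Replaces A's forward two-phase scan (find the first latchkey index, then test membership of 'gateway' in the slice after it) with a single backward pass over reversed(cmdline) that carries a gateway_ahead flag and succeeds at a latchkey arg with a gateway somewhere after it; no index, no slice, no empty-list special case.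
import Mathlib
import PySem

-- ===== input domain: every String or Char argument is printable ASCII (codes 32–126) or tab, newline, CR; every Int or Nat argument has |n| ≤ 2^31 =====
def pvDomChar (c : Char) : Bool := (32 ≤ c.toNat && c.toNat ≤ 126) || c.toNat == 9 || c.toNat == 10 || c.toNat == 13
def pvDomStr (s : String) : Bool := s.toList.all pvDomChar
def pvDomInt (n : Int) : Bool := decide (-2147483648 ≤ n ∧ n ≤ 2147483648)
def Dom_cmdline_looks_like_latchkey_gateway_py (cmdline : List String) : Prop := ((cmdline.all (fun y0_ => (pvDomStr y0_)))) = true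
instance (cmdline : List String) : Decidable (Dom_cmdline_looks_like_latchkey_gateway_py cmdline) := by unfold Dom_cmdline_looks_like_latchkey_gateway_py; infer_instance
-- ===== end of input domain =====

-- B replaces A's forward two-phase "find first latchkey index, then membership in the slice
-- after it" with a single backward pass over the reversed argv carrying a gateway-ahead flag
-- (objective: alternative).


-- ===== PORT A =====
-- the 'for idx, arg in enumerate(cmdline): if "latchkey" in arg: latchkey_idx = idx; break' loop
def pvFindLatchkeyIdx : List String → Int → Option Int
  | [], _ => none
  | arg :: rest, idx =>
    if PySem.Str.isIn "latchkey" arg then some idx else pvFindLatchkeyIdx rest (idx + 1)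

def cmdline_looks_like_latchkey_gateway_py (cmdline : List String) : Bool :=
  if cmdline.isEmpty then false
  else
    match pvFindLatchkeyIdx cmdline 0 with
    | none => false
    | some latchkey_idx =>
      -- 'gateway' in cmdline[latchkey_idx + 1 :]
      (PySem.List.slice cmdline (some (latchkey_idx + 1)) none).contains "gateway"

-- ===== PORT B =====
-- the backward pass over reversed(cmdline) carrying the gateway_ahead flag
def pvScanRev : List String → Bool → Bool
  | [], _ => false
  | arg :: rest, gateway_ahead =>
    if PySem.Str.isIn "latchkey" arg && gateway_ahead then true
    else pvScanRev rest (gateway_ahead || arg == "gateway")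

def cmdline_looks_like_latchkey_gateway_py_alt (cmdline : List String) : Bool :=
  pvScanRev cmdline.reverse false

-- ===== PRECONDITION & SPEC =====
def Spec_cmdline_looks_like_latchkey_gateway_py (cmdline : List String) (out : Bool) : Prop := out = cmdline_looks_like_latchkey_gateway_py_alt cmdline
instance (cmdline : List String) (out : Bool) : Decidable (Spec_cmdline_looks_like_latchkey_gateway_py cmdline out) := by unfold Spec_cmdline_looks_like_latchkey_gateway_py; infer_instance

-- ===== CLAIM (what is proved, stated in full; the proofs are below) =====
def Claim_equal_cmdline_looks_like_latchkey_gateway_py : Prop := ∀ (cmdline : List String), Dom_cmdline_looks_like_latchkey_gateway_py cmdline → Spec_cmdline_looks_like_latchkey_gateway_py cmdline (cmdline_looks_like_latchkey_gateway_py cmdline)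

-- ===== LEMMAS AND PROOFS =====

-- proof-side spec of A's find loop: Nat index of the first arg containing "latchkey"
def pvFindNat : List String → Option Nat
  | [] => none
  | arg :: rest =>
    if PySem.Str.isIn "latchkey" arg then some 0
    else
      match pvFindNat rest with
      | none => none
      | some k => some (k + 1)

theorem pvFindLatchkeyIdx_eq (l : List String) (n : Int) :
    pvFindLatchkeyIdx l n =
      (match pvFindNat l with
       | none => none
       | some k => some ((k : Int) + n)) := by
  induction l generalizing n with
  | nil => rfl
  | cons a t ih =>
    simp only [pvFindLatchkeyIdx, pvFindNat]
    split_ifs with h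
    · simp
    · rw [ih]
      cases pvFindNat t with
      | none => rfl
      | some k =>
        show some ((k : Int) + (n + 1)) = some (((k + 1 : Nat) : Int) + n)
        congr 1
        push_cast
        ring

-- a successful scan with a low flag must have seen a literal "gateway"
theorem pvScanRev_false_contains (l : List String) :
    pvScanRev l false = true → l.contains "gateway" = true := by
  induction l with
  | nil => intro h; exact absurd h (by simp [pvScanRev])
  | cons a t ih =>
    intro h
    simp only [pvScanRev, Bool.and_false, Bool.false_eq_true, if_false, Bool.false_or] at h
    by_cases hg : a = "gateway"
    · simp [hg]
    · have hb : (a == "gateway") = false := by simpa using hg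
      rw [hb] at h
      have := ih h
      simp only [List.contains_cons, this, Bool.or_true]

-- processing the appended (original first) element last
theorem pvScanRev_append (xs : List String) (a : String) (g : Bool) :
    pvScanRev (xs ++ [a]) g =
      (pvScanRev xs g || (PySem.Str.isIn "latchkey" a && (g || xs.contains "gateway"))) := by
  induction xs generalizing g with
  | nil => simp [pvScanRev]
  | cons x t ih =>
    simp only [List.cons_append, pvScanRev]
    by_cases h : (PySem.Str.isIn "latchkey" x && g) = true
    · rw [if_pos h, if_pos h, Bool.true_or]
    · rw [if_neg h, if_neg h, ih, List.contains_cons]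
      by_cases hg : x = "gateway"
      · subst hg
        cases g <;> simp
      · have hb : (x == "gateway") = false := by simpa using hg
        have hb2 : ("gateway" == x) = false := by simpa using (Ne.symm hg)
        rw [hb, hb2, Bool.or_false, Bool.false_or]

theorem A_unfold (l : List String) :
    cmdline_looks_like_latchkey_gateway_py l =
      (match pvFindLatchkeyIdx l 0 with
       | none => false
       | some i => (PySem.List.slice l (some (i + 1)) none).contains "gateway") := by
  cases l with
  | nil => rfl
  | cons a t => simp [cmdline_looks_like_latchkey_gateway_py]

theorem main_eq (l : List String) :
    cmdline_looks_like_latchkey_gateway_py l = pvScanRev l.reverse false := by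
  induction l with
  | nil => rfl
  | cons a t ih =>
    rw [List.reverse_cons, pvScanRev_append, Bool.false_or]
    simp only [cmdline_looks_like_latchkey_gateway_py, List.isEmpty_cons,
      pvFindLatchkeyIdx, Bool.false_eq_true, if_false]
    by_cases h : PySem.Str.isIn "latchkey" a = true
    · rw [if_pos h, h, Bool.true_and]
      dsimp only
      have hs : PySem.List.slice (a :: t) (some ((0 : Int) + 1)) none = t := by
        have := PySem.List.slice_from_natCast (a :: t) 1
        simpa using this
      rw [hs]
      have hc : t.reverse.contains "gateway" = t.contains "gateway" := by
        simp [List.contains_eq_mem]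
      rw [hc]
      by_cases hr : pvScanRev t.reverse false = true
      · rw [hr, Bool.true_or]
        have := pvScanRev_false_contains t.reverse hr
        rw [hc] at this
        exact this
      · rw [Bool.not_eq_true] at hr
        rw [hr, Bool.false_or]
    · rw [if_neg h]
      have hb : PySem.Str.isIn "latchkey" a = false := by simpa using h
      rw [hb, Bool.false_and, Bool.or_false, ← ih, A_unfold t]
      rw [pvFindLatchkeyIdx_eq t (0 + 1), pvFindLatchkeyIdx_eq t 0]
      cases pvFindNat t with
      | none => rfl
      | some k =>
        dsimp only
        show (PySem.List.slice (a :: t) (some ((k : Int) + (0 + 1) + 1)) none).contains "gateway"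
            = (PySem.List.slice t (some ((k : Int) + 0 + 1)) none).contains "gateway"
        have e1 : ((k : Int) + (0 + 1) + 1) = ((k + 2 : Nat) : Int) := by push_cast; ring
        have e2 : ((k : Int) + 0 + 1) = ((k + 1 : Nat) : Int) := by push_cast; ring
        rw [e1, e2, PySem.List.slice_from_natCast, PySem.List.slice_from_natCast]
        rw [show (k + 2) = (k + 1) + 1 from rfl, List.drop_succ_cons]

-- ===== VERDICT (by name: the statement is the Claim_ definition above) =====
theorem cmdline_looks_like_latchkey_gateway_py_spec : Claim_equal_cmdline_looks_like_latchkey_gateway_py := by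
  intro cmdline _
  unfold Spec_cmdline_looks_like_latchkey_gateway_py cmdline_looks_like_latchkey_gateway_py_alt
  exact main_eq cmdline
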